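-- pv_equiv track=rewrite | github.com/auntduda/EFC-package | feature_extraction.py | maximum_label_length
-- ===== SOURCE A (Python) =====
-- def maximum_label_length(fqdn):
--     maximum_label_len, curr_len = 0, 0
--     for c in fqdn:
--         if c != '.':
--             curr_len += 1
--             if curr_len > maximum_label_len:
--                 maximum_label_len = curr_len
--         else:
--             curr_len = 0
--     return maximum_label_len
-- ===== SOURCE B (Python) =====
-- def maximum_label_length(fqdn):
--     return max((len(label) for label in fqdn.split('.')), default=0)
-- ===== Notes on version B (the rewrite author's own statement) =====
-- stated objective: simpler
-- what changed: Replaces the stateful running-max character scan (a per-character counter reset at each dot) with a build-then-reduce: split the string at the dot separator and take the max of the label lengths.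
import Mathlib
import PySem

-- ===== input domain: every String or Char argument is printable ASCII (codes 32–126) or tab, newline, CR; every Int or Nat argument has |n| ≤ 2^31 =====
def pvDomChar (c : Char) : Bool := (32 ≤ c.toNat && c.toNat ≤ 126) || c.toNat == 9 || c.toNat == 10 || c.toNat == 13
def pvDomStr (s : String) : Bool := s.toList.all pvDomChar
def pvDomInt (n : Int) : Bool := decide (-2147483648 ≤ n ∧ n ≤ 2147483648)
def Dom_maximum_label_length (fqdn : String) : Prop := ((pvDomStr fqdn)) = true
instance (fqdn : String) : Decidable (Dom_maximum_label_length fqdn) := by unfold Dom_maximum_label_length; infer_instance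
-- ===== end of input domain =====

-- B replaces A's running-max character scan with split-on-dot then max of label lengths (simpler decomposition, same O(n) cost).
-- ===== PORT A =====
def maximum_label_length (fqdn : String) : Int :=
  (fqdn.toList.foldl (fun (st : Int × Int) c =>
      if c != '.' then
        let curr_len := st.2 + 1
        (if curr_len > st.1 then curr_len else st.1, curr_len)
      else (st.1, 0)) (0, 0)).1

-- ===== PORT B =====
def maximum_label_length_alt (fqdn : String) : Int :=
  ((PySem.Chars.splitOn fqdn.toList ['.']).map (fun label => (label.length : Int))).foldl max 0

-- ===== PRECONDITION & SPEC =====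
def Spec_maximum_label_length (fqdn : String) (out : Int) : Prop := out = maximum_label_length_alt fqdn
instance (fqdn : String) (out : Int) : Decidable (Spec_maximum_label_length fqdn out) := by unfold Spec_maximum_label_length; infer_instance

-- ===== CLAIM (what is proved, stated in full; the proofs are below) =====
def Claim_equal_maximum_label_length : Prop := ∀ (fqdn : String), Dom_maximum_label_length fqdn → Spec_maximum_label_length fqdn (maximum_label_length fqdn)

-- ===== LEMMAS AND PROOFS =====

-- ===== VERDICT (by name: the statement is the Claim_ definition above) =====
-- max over label lengths, the reduce of port B
def mll (ls : List (List Char)) : Int :=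
  (ls.map (fun label => (label.length : Int))).foldl max 0

theorem foldl_max_init (ls : List Int) (a b : Int) :
    ls.foldl max (max a b) = max a (ls.foldl max b) := by
  induction ls generalizing b with
  | nil => simp
  | cons x xs ih => simp only [List.foldl_cons, max_assoc]; exact ih _

theorem mll_cons (x : List Char) (ls : List (List Char)) :
    mll (x :: ls) = max (x.length : Int) (mll ls) := by
  simp only [mll, List.map_cons, List.foldl_cons]
  have : max (0 : Int) (x.length : Int) = max (x.length : Int) 0 := max_comm _ _
  rw [this, foldl_max_init]

theorem mll_nonneg (ls : List (List Char)) : 0 ≤ mll ls := by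
  induction ls with
  | nil => simp [mll]
  | cons x xs ih => rw [mll_cons]; exact le_trans ih (le_max_right _ _)

theorem dot_prefix (c : Char) (rest : List Char) :
    (['.'] : List Char).isPrefixOf (c :: rest) = ('.' == c) := by
  simp [List.isPrefixOf]

theorem go_acc (fuel : Nat) (l curc : List Char) (acc : List (List Char)) :
    PySem.Chars.splitOn.go ['.'] fuel l curc acc
      = acc.reverse ++ PySem.Chars.splitOn.go ['.'] fuel l curc [] := by
  induction fuel generalizing l curc acc with
  | zero => simp [PySem.Chars.splitOn.go]
  | succ f ih =>
    cases l with
    | nil => simp [PySem.Chars.splitOn.go]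
    | cons c rest =>
      simp only [PySem.Chars.splitOn.go]
      split
      · rw [ih _ _ (curc.reverse :: acc), ih _ _ [curc.reverse]]
        simp
      · exact ih _ _ _

theorem go_ge_cur (l : List Char) (fuel : Nat) (curc : List Char) :
    (curc.length : Int) ≤ mll (PySem.Chars.splitOn.go ['.'] fuel l curc []) := by
  induction l generalizing fuel curc with
  | nil =>
    cases fuel with
    | zero => simp [PySem.Chars.splitOn.go, mll_cons]
    | succ f => simp [PySem.Chars.splitOn.go, mll_cons]
  | cons c rest ih =>
    cases fuel with
    | zero =>
      simp only [PySem.Chars.splitOn.go]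
      rw [show ((curc.reverse ++ c :: rest) :: ([] : List (List Char))).reverse
            = [curc.reverse ++ c :: rest] by simp, mll_cons]
      refine le_trans ?_ (le_max_left _ _)
      simp only [List.length_append, List.length_reverse]
      push_cast
      omega
    | succ f =>
      simp only [PySem.Chars.splitOn.go, dot_prefix]
      split
      · rw [go_acc, show ([curc.reverse] : List (List Char)).reverse = [curc.reverse] by simp,
          List.singleton_append, mll_cons]
        simp
      · refine le_trans ?_ (ih f (c :: curc))
        simp

theorem main_loop (l : List Char) (fuel : Nat) (curc : List Char) (mx : Int)
    (hfuel : l.length < fuel) (hmx : (curc.length : Int) ≤ mx) :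
    (l.foldl (fun (st : Int × Int) c =>
        if c != '.' then
          let curr_len := st.2 + 1
          (if curr_len > st.1 then curr_len else st.1, curr_len)
        else (st.1, 0)) (mx, (curc.length : Int))).1
      = max mx (mll (PySem.Chars.splitOn.go ['.'] fuel l curc [])) := by
  induction l generalizing fuel curc mx with
  | nil =>
    cases fuel with
    | zero => omega
    | succ f =>
      simp only [PySem.Chars.splitOn.go, List.foldl_nil]
      rw [show ((curc.reverse) :: ([] : List (List Char))).reverse = [curc.reverse] by simp,
        mll_cons]
      simp only [mll, List.map_nil, List.foldl_nil]
      simp only [List.length_reverse]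
      omega
  | cons c rest ih =>
    cases fuel with
    | zero => omega
    | succ f =>
      have hf : rest.length < f := by simpa using hfuel
      simp only [PySem.Chars.splitOn.go, List.foldl_cons, dot_prefix]
      by_cases hc : c = '.'
      · subst hc
        simp only [bne_self_eq_false, Bool.false_eq_true, if_false]
        rw [if_pos (show (('.' : Char) == '.') = true from rfl)]
        rw [show List.drop (['.'] : List Char).length ('.' :: rest) = rest from by simp]
        rw [go_acc, show ([curc.reverse] : List (List Char)).reverse = [curc.reverse] by simp,
          List.singleton_append, mll_cons]
        have := ih f [] mx hf (by simpa using le_trans (Int.natCast_nonneg curc.length) hmx)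
        simp only [List.length_nil, Nat.cast_zero] at this
        rw [this]
        simp only [List.length_reverse]
        omega
      · rw [if_neg (show ¬(('.' == c) = true) from fun h => hc (beq_iff_eq.mp h).symm)]
        rw [if_pos (bne_iff_ne.mpr hc)]
        have hcur : ((c :: curc).length : Int) = (curc.length : Int) + 1 := by
          simp
        have hle : ((c :: curc).length : Int) ≤ max mx ((curc.length : Int) + 1) := by
          rw [hcur]; exact le_max_right _ _
        have := ih f (c :: curc) (max mx ((curc.length : Int) + 1)) hf hle
        rw [hcur] at this
        have hif : (if (curc.length : Int) + 1 > mx then (curc.length : Int) + 1 else mx)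
            = max mx ((curc.length : Int) + 1) := by
          split <;> omega
        simp only [hif, this]
        have hge := go_ge_cur rest f (c :: curc)
        rw [hcur] at hge
        omega

-- ===== VERDICT (by name: the statement is the Claim_ definition above) =====
theorem maximum_label_length_spec : Claim_equal_maximum_label_length := by
  intro fqdn _
  unfold Spec_maximum_label_length maximum_label_length maximum_label_length_alt
  unfold PySem.Chars.splitOn
  have := main_loop fqdn.toList (fqdn.toList.length + 1) [] 0 (by omega) (by simp)
  simp only [List.length_nil, Nat.cast_zero] at this
  rw [this]
  have h0 := mll_nonneg (PySem.Chars.splitOn.go ['.'] (fqdn.toList.length + 1) fqdn.toList [] [])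
  rw [mll] at h0 ⊢
  omega
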